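-- pv_equiv track=rewrite | github.com/Thor-xmy/Surgical_video | utils/data_loader_jigsawas.py | _group_by_subject
-- ===== SOURCE A (Python) =====
-- def _group_by_subject(video_list):
--     """按受试者分组"""
--     groups = {}
--     for video_name in video_list:
--         # 提取受试者组 (如 Suturing_B001 -> B)
--         match = video_name.split('_')
--         if len(match) >= 2:
--             subject = match[1][0]  # B001 -> B
--             if subject not in groups:
--                 groups[subject] = []
--             groups[subject].append(video_name)
--     return groups
-- ===== SOURCE B (Python) =====
-- def _group_by_subject(video_list):
--     # Alternative decomposition: extract (subject, name) pairs once, dedup the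
--     # subjects in first-appearance order, then build each group by filtering.
--     pairs = [(name.split('_')[1][0], name) for name in video_list
--              if len(name.split('_')) >= 2]
--     subjects = list(dict.fromkeys(s for s, _ in pairs))
--     return {s: [n for t, n in pairs if t == s] for s in subjects}
-- ===== Notes on version B (the rewrite author's own statement) =====
-- stated objective: alternative
-- what changed: Replaces the single incremental dict-building pass with a three-stage pipeline: extract (subject, name) pairs, dedup subjects in first-appearance order, then build each group by filtering the pair list per subject.
import Mathlib
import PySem

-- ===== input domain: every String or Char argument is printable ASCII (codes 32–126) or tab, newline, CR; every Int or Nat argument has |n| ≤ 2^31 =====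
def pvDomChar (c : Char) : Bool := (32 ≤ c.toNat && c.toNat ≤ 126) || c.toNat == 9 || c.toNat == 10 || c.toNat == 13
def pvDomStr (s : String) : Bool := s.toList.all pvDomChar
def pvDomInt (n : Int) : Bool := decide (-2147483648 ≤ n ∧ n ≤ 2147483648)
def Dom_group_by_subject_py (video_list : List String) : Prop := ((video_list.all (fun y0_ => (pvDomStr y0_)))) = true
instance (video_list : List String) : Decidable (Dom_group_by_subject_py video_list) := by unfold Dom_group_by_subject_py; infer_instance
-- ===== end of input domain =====

-- B replaces A's incremental dict-building pass by an extract-pairs / dedup-subjects / filter-per-subject pipeline (alternative decomposition, same results).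


-- ===== PORT A =====
-- literal transliteration of A: one pass over video_list building a dict
-- (subject = name.split('_')[1][0]; the `none` branch is Python's IndexError, excluded by Pre_).
def group_by_subject_py (video_list : List String) : List (String × List String) :=
  (video_list.foldl (fun groups video_name =>
      let m := ((PySem.Str.split? video_name "_").getD [])
      if m.length ≥ 2 then
        match PySem.Str.pyGet? (m.getD 1 "") 0 with
        | none => groups   -- Python raises IndexError here (second token empty); outside Pre_
        | some c =>
          let subject := String.ofList [c]
          let groups' := if groups.contains subject then groups
                         else groups.insert subject ([] : List String)
          groups'.modify subject [] (fun v => v ++ [video_name])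
      else groups)
    PySem.Dict.empty).items

-- ===== PORT B =====
-- transliteration of Source B: pair extraction, ordered dedup of subjects, one filter per subject.
def group_by_subject_py_alt (video_list : List String) : List (String × List String) :=
  let pairs := video_list.filterMap (fun name =>
    let m := ((PySem.Str.split? name "_").getD [])
    if m.length ≥ 2 then
      (PySem.Str.pyGet? (m.getD 1 "") 0).map (fun c => (String.ofList [c], name))
    else none)
  let subjects := PySem.List.dedup (pairs.map (fun p => p.1))
  subjects.map (fun s => (s, (pairs.filter (fun p => p.1 == s)).map (fun p => p.2)))

-- ===== PRECONDITION & SPEC =====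
-- Pre_ excludes exactly the inputs where Python A raises IndexError: an entry whose
-- '_'-split has ≥ 2 tokens but an EMPTY second token (match[1][0] out of range).
def Pre_group_by_subject_py (video_list : List String) : Prop :=
  ∀ n ∈ video_list, (((PySem.Str.split? n "_").getD [])).length ≥ 2 → (((PySem.Str.split? n "_").getD [])).getD 1 "" ≠ ""
instance (video_list : List String) : Decidable (Pre_group_by_subject_py video_list) := by
  unfold Pre_group_by_subject_py; infer_instance

def pvWitness_group_by_subject_py : List String :=
  ["Suturing_B001", "Suturing_C002", "Knot_B003", "plain"]

def Spec_group_by_subject_py (video_list : List String) (out : List (String × List String)) : Prop := out = group_by_subject_py_alt video_list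
instance (video_list : List String) (out : List (String × List String)) : Decidable (Spec_group_by_subject_py video_list out) := by unfold Spec_group_by_subject_py; infer_instance

-- ===== CLAIM (what is proved, stated in full; the proofs are below) =====
def Claim_equal_group_by_subject_py : Prop := ∀ (video_list : List String), Dom_group_by_subject_py video_list → Pre_group_by_subject_py video_list → Spec_group_by_subject_py video_list (group_by_subject_py video_list)

-- ===== LEMMAS AND PROOFS =====

-- the pair list B extracts (proof-side name for B's `pairs`)
def pvPairs (video_list : List String) : List (String × String) :=
  video_list.filterMap (fun name =>
    let m := ((PySem.Str.split? name "_").getD [])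
    if m.length ≥ 2 then
      (PySem.Str.pyGet? (m.getD 1 "") 0).map (fun c => (String.ofList [c], name))
    else none)

-- A's "insert [] if absent, then append" step is exactly a modify-append
lemma stepA_eq_modify (d : PySem.Dict String (List String)) (s n : String) :
    (if d.contains s then d else d.insert s ([] : List String)).modify s []
      (fun v => v ++ [n]) = d.modify s [] (fun v => v ++ [n]) := by
  by_cases h : d.contains s
  · simp [h]
  · simp only [Bool.not_eq_true] at h
    simp only [h, Bool.false_eq_true, if_false, PySem.Dict.modify,
      PySem.Dict.insert_insert_self, PySem.Dict.getD_insert_self,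
      PySem.Dict.getD_of_not_contains (h := h)]

-- A's whole pass is the modify-append fold over B's pair list
lemma foldA_eq_pairs_fold (l : List String) (d : PySem.Dict String (List String)) :
    l.foldl (fun groups video_name =>
      let m := ((PySem.Str.split? video_name "_").getD [])
      if m.length ≥ 2 then
        match PySem.Str.pyGet? (m.getD 1 "") 0 with
        | none => groups
        | some c =>
          let subject := String.ofList [c]
          let groups' := if groups.contains subject then groups
                         else groups.insert subject ([] : List String)
          groups'.modify subject [] (fun v => v ++ [video_name])
      else groups) d
    = (pvPairs l).foldl (fun d p => d.modify p.1 [] (fun v => v ++ [p.2])) d := by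
  induction l generalizing d with
  | nil => rfl
  | cons n l ih =>
    simp only [List.foldl_cons, pvPairs, List.filterMap_cons]
    by_cases hlen : (((PySem.Str.split? n "_").getD [])).length ≥ 2
    · cases hg : PySem.Str.pyGet? ((((PySem.Str.split? n "_").getD [])).getD 1 "") 0 with
      | none => simp only [hlen, if_true, Option.map_none]; exact ih d
      | some c =>
        simp only [hlen, if_true, Option.map_some, List.foldl_cons]
        rw [stepA_eq_modify]
        exact ih _
    · simp only [hlen, if_false]; exact ih d

theorem group_by_subject_py_spec : Claim_equal_group_by_subject_py := by
  intro video_list _ _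
  unfold Spec_group_by_subject_py group_by_subject_py group_by_subject_py_alt
  rw [foldA_eq_pairs_fold]
  have hnd : ((pvPairs video_list).foldl
      (fun d p => d.modify p.1 [] (fun v => v ++ [p.2])) PySem.Dict.empty).keys.Nodup := by
    exact PySem.Dict.nodup_keys_foldl_modify_key (pvPairs video_list) (fun p => p.1) []
      (fun d p => fun v => v ++ [p.2]) PySem.Dict.empty (by simp)
  rw [PySem.Dict.items_eq_map_keys _ hnd ([] : List String)]
  have hkeys : ((pvPairs video_list).foldl
      (fun d p => d.modify p.1 [] (fun v => v ++ [p.2])) PySem.Dict.empty).keys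
      = PySem.List.dedup ((pvPairs video_list).map (fun p => p.1)) := by
    rw [PySem.Dict.keys_foldl_modify_key]
    simp [PySem.Set.update_nil_left, PySem.Dict.keys_empty]
  rw [hkeys]
  apply List.map_congr_left
  intro k _
  have hget := PySem.Dict.getD_foldl_modify_append (l := pvPairs video_list)
    (d := PySem.Dict.empty) (c := k)
  simp only [PySem.Dict.getD_empty, List.nil_append] at hget
  rw [hget]
  rfl
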